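-- pv_equiv track=rewrite | github.com/pilawsk/Cipher | Cipher.py | format_groups
-- ===== SOURCE A (Python) =====
-- def format_groups(message):
--     # Ensure no newline characters are present
--     message = message.replace("\n", "")
--     groups = []
--     # Fixed cycle: groups of 3, 4, and 5 characters.
--     pattern = [3, 4, 5]
--     i, j = 0, 0
--     while i < len(message):
--         group_len = pattern[j % len(pattern)]
--         groups.append(message[i:i+group_len])
--         i += group_len
--         j += 1
--     # Join groups with exactly one space between them.
--     return ' '.join(groups).strip()
-- ===== SOURCE B (Python) =====
-- def format_groups(message):
--     # Block-of-12 decomposition: each 12-char block yields exactly one 3+4+5 cycle.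
--     s = message.replace("\n", "")
--     parts = []
--     k = 0
--     while k + 12 <= len(s):
--         block = s[k:k+12]
--         parts.append(block[0:3])
--         parts.append(block[3:7])
--         parts.append(block[7:12])
--         k += 12
--     rest = s[k:]
--     for size in (3, 4, 5):
--         if not rest:
--             break
--         parts.append(rest[:size])
--         rest = rest[size:]
--     return ' '.join(parts).strip()
-- ===== Notes on version B (the rewrite author's own statement) =====
-- stated objective: alternative
-- what changed: Replaces the per-group while loop with cyclic pattern indexing (pattern[j % 3]) by a stride-12 block loop that emits the three fixed slices of each full 12-char block plus a greedy 3/4/5 split of the trailing remainder.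
import Mathlib
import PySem

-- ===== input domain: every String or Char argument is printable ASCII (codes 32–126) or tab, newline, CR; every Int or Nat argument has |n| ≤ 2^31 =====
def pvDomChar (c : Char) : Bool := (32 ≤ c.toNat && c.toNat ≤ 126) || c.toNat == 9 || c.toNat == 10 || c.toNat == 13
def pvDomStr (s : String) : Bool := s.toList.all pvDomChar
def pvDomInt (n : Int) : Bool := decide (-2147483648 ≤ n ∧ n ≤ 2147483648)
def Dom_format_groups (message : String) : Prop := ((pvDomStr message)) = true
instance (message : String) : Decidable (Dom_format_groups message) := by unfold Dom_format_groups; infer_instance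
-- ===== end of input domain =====

-- B reshapes A's per-group cyclic loop into a stride-12 block loop with a greedy 3/4/5 remainder; same output (alternative decomposition).

-- ===== PORT A =====
-- pattern[j % len(pattern)] with pattern = [3, 4, 5]
def patAt (j : Nat) : Nat := ([3, 4, 5] : List Nat).getD (j % 3) 0

theorem patAt_pos (j : Nat) : 3 ≤ patAt j := by
  have h : j % 3 = 0 ∨ j % 3 = 1 ∨ j % 3 = 2 := by omega
  rcases h with h | h | h <;> simp [patAt, h]

-- the while loop: groups.append(message[i:i+group_len]); i += group_len; j += 1
def formatALoop (msg : List Char) (i j : Nat) (groups : List (List Char)) :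
    List (List Char) :=
  if _h : i < msg.length then
    let g := patAt j
    formatALoop msg (i + g) (j + 1) (groups ++ [(msg.drop i).take g])
  else groups
termination_by msg.length - i
decreasing_by have := patAt_pos j; omega

def format_groups (message : String) : String :=
  String.ofList (PySem.Chars.strip (PySem.Chars.join [' ']
    (formatALoop ((PySem.Str.replace message "\n" "").toList) 0 0 [])))

-- ===== PORT B =====
-- the trailing remainder: greedily peel groups of sizes 3, 4, 5 until empty
def formatBRest (rest : List Char) (sizes : List Nat) : List (List Char) :=
  match sizes with
  | [] => []
  | sz :: tl => if rest = [] then [] else rest.take sz :: formatBRest (rest.drop sz) tl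

-- the stride-12 block loop: each full block contributes block[0:3], block[3:7], block[7:12]
def formatBBlocks (s : List Char) : List (List Char) :=
  if _h : 12 ≤ s.length then
    s.take 3 :: (s.drop 3).take 4 :: (s.drop 7).take 5 :: formatBBlocks (s.drop 12)
  else formatBRest s [3, 4, 5]
termination_by s.length
decreasing_by simp; omega

def format_groups_alt (message : String) : String :=
  String.ofList (PySem.Chars.strip (PySem.Chars.join [' ']
    (formatBBlocks ((PySem.Str.replace message "\n" "").toList))))

-- ===== PRECONDITION & SPEC =====
def Spec_format_groups (message : String) (out : String) : Prop := out = format_groups_alt message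
instance (message : String) (out : String) : Decidable (Spec_format_groups message out) := by unfold Spec_format_groups; infer_instance

-- ===== CLAIM (what is proved, stated in full; the proofs are below) =====
def Claim_equal_format_groups : Prop := ∀ (message : String), Dom_format_groups message → Spec_format_groups message (format_groups message)

-- ===== LEMMAS AND PROOFS =====

-- reference chopping function: A's loop viewed on the remaining suffix
def chop (s : List Char) (j : Nat) : List (List Char) :=
  if _h : s = [] then [] else s.take (patAt j) :: chop (s.drop (patAt j)) (j + 1)
termination_by s.length
decreasing_by
  have := patAt_pos j
  have : 0 < s.length := List.length_pos_of_ne_nil _h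
  simp; omega

theorem chop_nil (j : Nat) : chop [] j = [] := by rw [chop]; simp

theorem chop_ne (s : List Char) (j : Nat) (h : s ≠ []) :
    chop s j = s.take (patAt j) :: chop (s.drop (patAt j)) (j + 1) := by
  rw [chop]; simp [h]

theorem patAt_add_three (j : Nat) : patAt (j + 3) = patAt j := by
  simp [patAt]

theorem chop_add_three (s : List Char) (j : Nat) : chop s (j + 3) = chop s j := by
  by_cases h : s = []
  · subst h; rw [chop_nil, chop_nil]
  · rw [chop_ne s (j + 3) h, chop_ne s j h, patAt_add_three]
    rw [show j + 3 + 1 = j + 1 + 3 from by omega]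
    rw [chop_add_three (s.drop (patAt j)) (j + 1)]
termination_by s.length
decreasing_by
  have := patAt_pos j
  have : 0 < s.length := List.length_pos_of_ne_nil h
  simp; omega

theorem formatALoop_eq_chop (msg : List Char) (i j : Nat) (groups : List (List Char)) :
    formatALoop msg i j groups = groups ++ chop (msg.drop i) j := by
  by_cases h : i < msg.length
  · rw [formatALoop, dif_pos h]
    show formatALoop msg (i + patAt j) (j + 1) (groups ++ [(msg.drop i).take (patAt j)])
        = groups ++ chop (msg.drop i) j
    rw [formatALoop_eq_chop msg (i + patAt j) (j + 1)]
    rw [chop_ne (msg.drop i) j (by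
      intro hc; have := congrArg List.length hc; simp at this; omega)]
    simp [List.drop_drop]
  · rw [formatALoop, dif_neg h]
    have hnil : msg.drop i = [] := List.eq_nil_of_length_eq_zero (by simp; omega)
    rw [hnil, chop_nil]; simp
termination_by msg.length - i
decreasing_by
  have := patAt_pos j
  omega

theorem patAt_zero : patAt 0 = 3 := by decide
theorem patAt_one : patAt 1 = 4 := by decide
theorem patAt_two : patAt 2 = 5 := by decide

theorem formatBRest_eq_chop (s : List Char) (h : s.length < 12) :
    formatBRest s [3, 4, 5] = chop s 0 := by
  by_cases h0 : s = []
  · subst h0; rw [chop_nil]; simp [formatBRest]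
  · rw [chop_ne s 0 h0, patAt_zero]
    unfold formatBRest
    rw [if_neg h0]
    congr 1
    norm_num
    by_cases h3 : s.drop 3 = []
    · rw [h3, chop_nil]; simp [formatBRest]
    · rw [chop_ne (s.drop 3) 1 h3, patAt_one]
      unfold formatBRest
      rw [if_neg h3]
      congr 1
      norm_num
      by_cases h7 : s.drop 7 = []
      · rw [h7, chop_nil]; simp [formatBRest]
      · rw [chop_ne (s.drop 7) 2 h7, patAt_two]
        unfold formatBRest
        rw [if_neg h7]
        congr 1
        have hnil : (s.drop 7).drop 5 = [] := by
          apply List.eq_nil_of_length_eq_zero; simp; omega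
        rw [hnil, chop_nil]; simp [formatBRest]

theorem formatBBlocks_eq_chop (s : List Char) : formatBBlocks s = chop s 0 := by
  by_cases h : 12 ≤ s.length
  · have h0 : s ≠ [] := by intro hc; subst hc; simp at h
    have h3 : s.drop 3 ≠ [] := by
      intro hc; have := congrArg List.length hc; simp at this; omega
    have h7 : s.drop 7 ≠ [] := by
      intro hc; have := congrArg List.length hc; simp at this; omega
    have h03 : chop (s.drop 12) 3 = chop (s.drop 12) 0 := by
      simpa using chop_add_three (s.drop 12) 0
    have hc : chop s 0
        = s.take 3 :: (s.drop 3).take 4 :: (s.drop 7).take 5 :: chop (s.drop 12) 3 := by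
      calc chop s 0 = s.take 3 :: chop (s.drop 3) 1 := by
            rw [chop_ne s 0 h0, patAt_zero]
        _ = s.take 3 :: (s.drop 3).take 4 :: chop ((s.drop 3).drop 4) 2 := by
            rw [chop_ne (s.drop 3) 1 h3, patAt_one]
        _ = s.take 3 :: (s.drop 3).take 4 :: (s.drop 7).take 5 :: chop (s.drop 12) 3 := by
            have hd : (s.drop 3).drop 4 = s.drop 7 := by
              rw [List.drop_drop]
            rw [hd, chop_ne (s.drop 7) 2 h7, patAt_two, List.drop_drop]
    rw [formatBBlocks, dif_pos h, formatBBlocks_eq_chop (s.drop 12), hc, h03]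
  · rw [formatBBlocks, dif_neg h]
    exact formatBRest_eq_chop s (by omega)
termination_by s.length
decreasing_by simp; omega

-- ===== VERDICT (by name: the statement is the Claim_ definition above) =====
theorem format_groups_spec : Claim_equal_format_groups := by
  intro message _
  unfold Spec_format_groups format_groups format_groups_alt
  simp only [formatALoop_eq_chop, formatBBlocks_eq_chop, List.drop_zero, List.nil_append]
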